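-- pv_equiv track=rewrite | github.com/aptend/aoc | 2018/day17/python/day17.py | boundry
-- ===== SOURCE A (Python) =====
-- def boundry(ver_lines, hor_lines):
--     x_points = set(l[0] for l in ver_lines)
--     y_points = set(l[0] for l in hor_lines)
--     for line in ver_lines:
--         y_points.add(line[1])
--         y_points.add(line[2])
--     for line in hor_lines:
--         x_points.add(line[1])
--         x_points.add(line[2])
--     x_min, x_max = min(x_points), max(x_points)
--     y_min, y_max = min(y_points), max(y_points)
--     return (x_min, x_max, y_min, y_max)
-- ===== SOURCE B (Python) =====
-- def _upd(ext, x, y):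
--     if ext is None:
--         return (x, x, y, y)
--     x_min, x_max, y_min, y_max = ext
--     return (min(x_min, x), max(x_max, x), min(y_min, y), max(y_max, y))
--
--
-- def boundry(ver_lines, hor_lines):
--     ext = None
--     for x, y1, y2 in ver_lines:
--         ext = _upd(_upd(ext, x, y1), x, y2)
--     for y, x1, x2 in hor_lines:
--         ext = _upd(_upd(ext, x1, y), x2, y)
--     if ext is None:
--         raise ValueError("boundry() of empty line lists")
--     return ext
-- ===== Notes on version B (the rewrite author's own statement) =====
-- stated objective: simpler
-- what changed: Replaced the build-two-sets-then-four-min/max-reductions structure by a single pass of running extremes: each line contributes its two endpoints to one running (x_min,x_max,y_min,y_max) accumulator, no intermediate sets.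
-- outside the precondition, e.g. on boundry([], []): A raises ValueError, B raises ValueError
import Mathlib
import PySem

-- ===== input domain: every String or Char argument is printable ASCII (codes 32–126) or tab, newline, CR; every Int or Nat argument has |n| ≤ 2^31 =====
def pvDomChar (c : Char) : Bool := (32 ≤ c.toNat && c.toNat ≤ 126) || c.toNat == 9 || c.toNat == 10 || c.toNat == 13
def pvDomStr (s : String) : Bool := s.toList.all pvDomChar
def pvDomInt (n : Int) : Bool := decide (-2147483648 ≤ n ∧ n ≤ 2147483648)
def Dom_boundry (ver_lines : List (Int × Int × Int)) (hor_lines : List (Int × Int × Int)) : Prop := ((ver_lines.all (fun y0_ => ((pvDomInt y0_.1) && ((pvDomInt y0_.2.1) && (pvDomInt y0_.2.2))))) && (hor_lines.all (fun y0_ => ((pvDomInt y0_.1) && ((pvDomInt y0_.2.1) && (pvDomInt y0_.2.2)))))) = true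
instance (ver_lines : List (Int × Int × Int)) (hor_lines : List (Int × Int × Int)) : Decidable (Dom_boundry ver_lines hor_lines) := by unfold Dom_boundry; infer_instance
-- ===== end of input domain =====

-- B replaces A's build-sets-then-min/max structure by a single running-extremes pass (objective: simpler).

-- ===== PORT A =====
-- literal port of A: build x/y point sets, then min/max of each (set iteration order
-- does not matter for min/max on Int); on empty sets Python's min raises — excluded by Pre_,
-- here .getD 0.
def boundry (ver_lines : List (Int × Int × Int)) (hor_lines : List (Int × Int × Int)) : Int × Int × Int × Int :=
  let x_points0 : PySem.Set Int := PySem.Set.ofList (ver_lines.map (fun l => l.1))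
  let y_points0 : PySem.Set Int := PySem.Set.ofList (hor_lines.map (fun l => l.1))
  let y_points : PySem.Set Int :=
    ver_lines.foldl (fun s l => PySem.Set.add (PySem.Set.add s l.2.1) l.2.2) y_points0
  let x_points : PySem.Set Int :=
    hor_lines.foldl (fun s l => PySem.Set.add (PySem.Set.add s l.2.1) l.2.2) x_points0
  ((PySem.List.min? x_points (fun a => a)).getD 0,
   (PySem.List.max? x_points (fun a => a)).getD 0,
   (PySem.List.min? y_points (fun a => a)).getD 0,
   (PySem.List.max? y_points (fun a => a)).getD 0)

-- ===== PORT B =====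
-- _upd from Source B
def pvUpd (ext : Option (Int × Int × Int × Int)) (x y : Int) : Option (Int × Int × Int × Int) :=
  match ext with
  | none => some (x, x, y, y)
  | some (x_min, x_max, y_min, y_max) =>
      some (min x_min x, max x_max x, min y_min y, max y_max y)

-- literal port of B: one running-extremes accumulator fed both endpoints of every line;
-- ext = none at the end (both lists empty) is Python's ValueError — excluded by Pre_, here .getD.
def boundry_alt (ver_lines : List (Int × Int × Int)) (hor_lines : List (Int × Int × Int)) : Int × Int × Int × Int :=
  let e1 := ver_lines.foldl (fun e l => pvUpd (pvUpd e l.1 l.2.1) l.1 l.2.2) none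
  let e2 := hor_lines.foldl (fun e l => pvUpd (pvUpd e l.2.1 l.1) l.2.2 l.1) e1
  e2.getD (0, 0, 0, 0)

-- ===== PRECONDITION & SPEC =====
-- Pre_ excludes exactly the input ([], []) on which A's min() (and B alike) raises ValueError.
def Pre_boundry (ver_lines : List (Int × Int × Int)) (hor_lines : List (Int × Int × Int)) : Prop :=
  ¬ (ver_lines = [] ∧ hor_lines = [])
instance (ver_lines : List (Int × Int × Int)) (hor_lines : List (Int × Int × Int)) : Decidable (Pre_boundry ver_lines hor_lines) := by unfold Pre_boundry; infer_instance
def pvWitness_boundry : (List (Int × Int × Int)) × (List (Int × Int × Int)) := ([(3, 1, 5)], [(2, 0, 4)])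
def Spec_boundry (ver_lines : List (Int × Int × Int)) (hor_lines : List (Int × Int × Int)) (out : Int × Int × Int × Int) : Prop := out = boundry_alt ver_lines hor_lines
instance (ver_lines : List (Int × Int × Int)) (hor_lines : List (Int × Int × Int)) (out : Int × Int × Int × Int) : Decidable (Spec_boundry ver_lines hor_lines out) := by unfold Spec_boundry; infer_instance

-- ===== CLAIM (what is proved, stated in full; the proofs are below) =====
def Claim_equal_boundry : Prop := ∀ (ver_lines : List (Int × Int × Int)) (hor_lines : List (Int × Int × Int)), Dom_boundry ver_lines hor_lines → Pre_boundry ver_lines hor_lines → Spec_boundry ver_lines hor_lines (boundry ver_lines hor_lines)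

-- ===== LEMMAS AND PROOFS =====

-- m is the minimum / maximum of the values satisfying P
def IsMinP (P : Int → Prop) (m : Int) : Prop := P m ∧ ∀ x, P x → m ≤ x
def IsMaxP (P : Int → Prop) (m : Int) : Prop := P m ∧ ∀ x, P x → x ≤ m

theorem isMinP_unique {P : Int → Prop} {m m' : Int} (h : IsMinP P m) (h' : IsMinP P m') : m = m' :=
  le_antisymm (h.2 _ h'.1) (h'.2 _ h.1)

theorem isMaxP_unique {P : Int → Prop} {m m' : Int} (h : IsMaxP P m) (h' : IsMaxP P m') : m = m' :=
  le_antisymm (h'.2 _ h.1) (h.2 _ h'.1)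

-- membership in A's double-add fold
theorem mem_foldAdd (ls : List (Int × Int × Int)) (s : PySem.Set Int) (x : Int) :
    x ∈ ls.foldl (fun s l => PySem.Set.add (PySem.Set.add s l.2.1) l.2.2) s ↔
      x ∈ s ∨ ∃ l ∈ ls, x = l.2.1 ∨ x = l.2.2 := by
  induction ls generalizing s with
  | nil => simp
  | cons a t ih =>
      simp [List.foldl_cons, ih, PySem.Set.mem_add]
      constructor
      · rintro (((h|h)|h)|h)
        · exact Or.inl h
        · exact Or.inr (Or.inl (Or.inl h))
        · exact Or.inr (Or.inl (Or.inr h))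
        · exact Or.inr (Or.inr h)
      · rintro (h|(h|h)|h)
        · exact Or.inl (Or.inl (Or.inl h))
        · exact Or.inl (Or.inl (Or.inr h))
        · exact Or.inl (Or.inr h)
        · exact Or.inr h

-- the x-points (resp. y-points) both programs range over
def PX (v h : List (Int × Int × Int)) (x : Int) : Prop :=
  (∃ l ∈ v, x = l.1) ∨ ∃ l ∈ h, x = l.2.1 ∨ x = l.2.2
def PY (v h : List (Int × Int × Int)) (y : Int) : Prop :=
  (∃ l ∈ h, y = l.1) ∨ ∃ l ∈ v, y = l.2.1 ∨ y = l.2.2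

-- the two loops of B, flattened to one fold over the contributed (x,y) points
def pts (v h : List (Int × Int × Int)) : List (Int × Int) :=
  v.flatMap (fun l => [(l.1, l.2.1), (l.1, l.2.2)]) ++
  h.flatMap (fun l => [(l.2.1, l.1), (l.2.2, l.1)])

theorem vloop_eq (v : List (Int × Int × Int)) (e : Option (Int × Int × Int × Int)) :
    v.foldl (fun e l => pvUpd (pvUpd e l.1 l.2.1) l.1 l.2.2) e =
      (v.flatMap (fun l => [(l.1, l.2.1), (l.1, l.2.2)])).foldl (fun e p => pvUpd e p.1 p.2) e := by
  induction v generalizing e with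
  | nil => simp
  | cons a t ih => simp [ih]

theorem hloop_eq (h : List (Int × Int × Int)) (e : Option (Int × Int × Int × Int)) :
    h.foldl (fun e l => pvUpd (pvUpd e l.2.1 l.1) l.2.2 l.1) e =
      (h.flatMap (fun l => [(l.2.1, l.1), (l.2.2, l.1)])).foldl (fun e p => pvUpd e p.1 p.2) e := by
  induction h generalizing e with
  | nil => simp
  | cons a t ih => simp [ih]

theorem alt_eq (v h : List (Int × Int × Int)) :
    boundry_alt v h = ((pts v h).foldl (fun e p => pvUpd e p.1 p.2) none).getD (0, 0, 0, 0) := by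
  simp [boundry_alt, pts, vloop_eq, hloop_eq, List.foldl_append]

theorem foldl_pvUpd_some (ps : List (Int × Int)) : ∀ (e : Int × Int × Int × Int),
    ps.foldl (fun e p => pvUpd e p.1 p.2) (some e) =
      some ((ps.map Prod.fst).foldl min e.1, (ps.map Prod.fst).foldl max e.2.1,
            (ps.map Prod.snd).foldl min e.2.2.1, (ps.map Prod.snd).foldl max e.2.2.2) := by
  induction ps with
  | nil => intro e; rfl
  | cons a t ih =>
      intro e
      simp only [List.foldl_cons]
      have h0 : pvUpd (some e) a.1 a.2 =
          some (min e.1 a.1, max e.2.1 a.1, min e.2.2.1 a.2, max e.2.2.2 a.2) := rfl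
      rw [h0, ih]
      simp

theorem isMinP_equiv {P Q : Int → Prop} {m : Int} (h : ∀ x, P x ↔ Q x) (hm : IsMinP P m) :
    IsMinP Q m := ⟨(h m).mp hm.1, fun x hx => hm.2 x ((h x).mpr hx)⟩

theorem isMaxP_equiv {P Q : Int → Prop} {m : Int} (h : ∀ x, P x ↔ Q x) (hm : IsMaxP P m) :
    IsMaxP Q m := ⟨(h m).mp hm.1, fun x hx => hm.2 x ((h x).mpr hx)⟩

theorem isMinP_foldl_min (a : Int) (L : List Int) : IsMinP (fun x => x ∈ a :: L) (L.foldl min a) := by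
  constructor
  · rcases PySem.List.foldl_min_mem L a with hm | hm
    · rw [hm]; exact List.mem_cons_self
    · exact List.mem_cons_of_mem _ hm
  · intro x hx
    rcases List.mem_cons.mp hx with rfl | hx
    · exact (PySem.List.foldl_min_le L x).1
    · exact (PySem.List.foldl_min_le L a).2 x hx

theorem isMaxP_foldl_max (a : Int) (L : List Int) : IsMaxP (fun x => x ∈ a :: L) (L.foldl max a) := by
  constructor
  · rcases PySem.List.foldl_max_mem L a with hm | hm
    · rw [hm]; exact List.mem_cons_self
    · exact List.mem_cons_of_mem _ hm
  · intro x hx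
    rcases List.mem_cons.mp hx with rfl | hx
    · exact (PySem.List.le_foldl_max L x).1
    · exact (PySem.List.le_foldl_max L a).2 x hx

theorem mem_pts_fst (v h : List (Int × Int × Int)) (x : Int) :
    x ∈ (pts v h).map Prod.fst ↔ PX v h x := by
  simp only [pts, List.map_append, List.mem_append, List.map_flatMap, List.mem_flatMap, PX,
    List.mem_map, List.mem_cons, List.not_mem_nil, or_false]
  constructor
  · rintro (⟨l, hl, hm⟩ | ⟨l, hl, hm⟩) <;> rcases hm with ⟨q, (rfl | rfl), rfl⟩
    · exact Or.inl ⟨l, hl, rfl⟩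
    · exact Or.inl ⟨l, hl, rfl⟩
    · exact Or.inr ⟨l, hl, Or.inl rfl⟩
    · exact Or.inr ⟨l, hl, Or.inr rfl⟩
  · rintro (⟨l, hl, rfl⟩ | ⟨l, hl, rfl | rfl⟩)
    · exact Or.inl ⟨l, hl, (l.1, l.2.1), Or.inl rfl, rfl⟩
    · exact Or.inr ⟨l, hl, (l.2.1, l.1), Or.inl rfl, rfl⟩
    · exact Or.inr ⟨l, hl, (l.2.2, l.1), Or.inr rfl, rfl⟩

theorem mem_pts_snd (v h : List (Int × Int × Int)) (y : Int) :
    y ∈ (pts v h).map Prod.snd ↔ PY v h y := by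
  simp only [pts, List.map_append, List.mem_append, List.map_flatMap, List.mem_flatMap, PY,
    List.mem_map, List.mem_cons, List.not_mem_nil, or_false]
  constructor
  · rintro (⟨l, hl, hm⟩ | ⟨l, hl, hm⟩) <;> rcases hm with ⟨q, (rfl | rfl), rfl⟩
    · exact Or.inr ⟨l, hl, Or.inl rfl⟩
    · exact Or.inr ⟨l, hl, Or.inr rfl⟩
    · exact Or.inl ⟨l, hl, rfl⟩
    · exact Or.inl ⟨l, hl, rfl⟩
  · rintro (⟨l, hl, rfl⟩ | ⟨l, hl, rfl | rfl⟩)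
    · exact Or.inr ⟨l, hl, (l.2.1, l.1), Or.inl rfl, rfl⟩
    · exact Or.inl ⟨l, hl, (l.1, l.2.1), Or.inl rfl, rfl⟩
    · exact Or.inl ⟨l, hl, (l.1, l.2.2), Or.inr rfl, rfl⟩

theorem pts_ne_nil (v h : List (Int × Int × Int)) (hpre : Pre_boundry v h) : pts v h ≠ [] := by
  unfold Pre_boundry at hpre
  cases v with
  | cons a t => simp [pts]
  | nil =>
      cases h with
      | cons a t => simp [pts]
      | nil => exact absurd ⟨rfl, rfl⟩ hpre

-- B's four components are the extremes of the contributed points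
theorem B_bounds (v h : List (Int × Int × Int)) (hpre : Pre_boundry v h) :
    IsMinP (PX v h) (boundry_alt v h).1 ∧ IsMaxP (PX v h) (boundry_alt v h).2.1 ∧
    IsMinP (PY v h) (boundry_alt v h).2.2.1 ∧ IsMaxP (PY v h) (boundry_alt v h).2.2.2 := by
  obtain ⟨p, rest, hps⟩ := List.exists_cons_of_ne_nil (pts_ne_nil v h hpre)
  have hfst : ∀ x, x ∈ p.1 :: rest.map Prod.fst ↔ PX v h x := by
    intro x; rw [← mem_pts_fst v h x, hps]; simp
  have hsnd : ∀ y, y ∈ p.2 :: rest.map Prod.snd ↔ PY v h y := by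
    intro y; rw [← mem_pts_snd v h y, hps]; simp
  rw [alt_eq, hps, List.foldl_cons]
  have h0 : pvUpd none p.1 p.2 = some (p.1, p.1, p.2, p.2) := rfl
  rw [h0, foldl_pvUpd_some]
  simp only [Option.getD_some]
  exact ⟨isMinP_equiv hfst (isMinP_foldl_min _ _), isMaxP_equiv hfst (isMaxP_foldl_max _ _),
         isMinP_equiv hsnd (isMinP_foldl_min _ _), isMaxP_equiv hsnd (isMaxP_foldl_max _ _)⟩

-- A-side: min/max over a nonempty list is its least/greatest member
theorem isMinP_min?_getD (S : List Int) (hne : S ≠ []) :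
    IsMinP (fun x => x ∈ S) ((PySem.List.min? S (fun a => a)).getD 0) := by
  cases hS : PySem.List.min? S (fun a => a) with
  | none => exact absurd ((PySem.List.min?_eq_none_iff _ _).mp hS) hne
  | some m =>
      refine ⟨?_, ?_⟩
      · simpa using PySem.List.min?_mem hS
      · intro x hx; simpa using PySem.List.min?_isMin hS x hx

theorem isMaxP_max?_getD (S : List Int) (hne : S ≠ []) :
    IsMaxP (fun x => x ∈ S) ((PySem.List.max? S (fun a => a)).getD 0) := by
  cases hS : PySem.List.max? S (fun a => a) with
  | none => exact absurd ((PySem.List.max?_eq_none_iff _ _).mp hS) hne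
  | some m =>
      refine ⟨?_, ?_⟩
      · simpa using PySem.List.max?_mem hS
      · intro x hx; simpa using PySem.List.max?_isMax hS x hx

-- membership in A's x_points / y_points sets
theorem mem_xset (v h : List (Int × Int × Int)) (x : Int) :
    x ∈ h.foldl (fun s l => PySem.Set.add (PySem.Set.add s l.2.1) l.2.2)
          (PySem.Set.ofList (v.map (fun l => l.1))) ↔ PX v h x := by
  rw [mem_foldAdd, PySem.Set.mem_ofList]
  unfold PX
  simp only [List.mem_map]
  constructor
  · rintro (⟨l, hl, rfl⟩ | hm)
    · exact Or.inl ⟨l, hl, rfl⟩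
    · exact Or.inr hm
  · rintro (⟨l, hl, rfl⟩ | hm)
    · exact Or.inl ⟨l, hl, rfl⟩
    · exact Or.inr hm

theorem mem_yset (v h : List (Int × Int × Int)) (y : Int) :
    y ∈ v.foldl (fun s l => PySem.Set.add (PySem.Set.add s l.2.1) l.2.2)
          (PySem.Set.ofList (h.map (fun l => l.1))) ↔ PY v h y := by
  rw [mem_foldAdd, PySem.Set.mem_ofList]
  unfold PY
  simp only [List.mem_map]
  constructor
  · rintro (⟨l, hl, rfl⟩ | hm)
    · exact Or.inl ⟨l, hl, rfl⟩
    · exact Or.inr hm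
  · rintro (⟨l, hl, rfl⟩ | hm)
    · exact Or.inl ⟨l, hl, rfl⟩
    · exact Or.inr hm

theorem PX_witness (v h : List (Int × Int × Int)) (hpre : Pre_boundry v h) : ∃ x, PX v h x := by
  unfold Pre_boundry at hpre
  cases v with
  | cons a t => exact ⟨a.1, Or.inl ⟨a, List.mem_cons_self, rfl⟩⟩
  | nil =>
      cases h with
      | cons a t => exact ⟨a.2.1, Or.inr ⟨a, List.mem_cons_self, Or.inl rfl⟩⟩
      | nil => exact absurd ⟨rfl, rfl⟩ hpre

theorem PY_witness (v h : List (Int × Int × Int)) (hpre : Pre_boundry v h) : ∃ y, PY v h y := by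
  unfold Pre_boundry at hpre
  cases h with
  | cons a t => exact ⟨a.1, Or.inl ⟨a, List.mem_cons_self, rfl⟩⟩
  | nil =>
      cases v with
      | cons a t => exact ⟨a.2.1, Or.inr ⟨a, List.mem_cons_self, Or.inl rfl⟩⟩
      | nil => exact absurd ⟨rfl, rfl⟩ hpre

-- A's four components are the same extremes
theorem A_bounds (v h : List (Int × Int × Int)) (hpre : Pre_boundry v h) :
    IsMinP (PX v h) (boundry v h).1 ∧ IsMaxP (PX v h) (boundry v h).2.1 ∧
    IsMinP (PY v h) (boundry v h).2.2.1 ∧ IsMaxP (PY v h) (boundry v h).2.2.2 := by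
  obtain ⟨x0, hx0⟩ := PX_witness v h hpre
  obtain ⟨y0, hy0⟩ := PY_witness v h hpre
  have hxne : h.foldl (fun s l => PySem.Set.add (PySem.Set.add s l.2.1) l.2.2)
      (PySem.Set.ofList (v.map (fun l => l.1))) ≠ [] :=
    List.ne_nil_of_mem ((mem_xset v h x0).mpr hx0)
  have hyne : v.foldl (fun s l => PySem.Set.add (PySem.Set.add s l.2.1) l.2.2)
      (PySem.Set.ofList (h.map (fun l => l.1))) ≠ [] :=
    List.ne_nil_of_mem ((mem_yset v h y0).mpr hy0)
  unfold boundry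
  exact ⟨isMinP_equiv (mem_xset v h) (isMinP_min?_getD _ hxne),
         isMaxP_equiv (mem_xset v h) (isMaxP_max?_getD _ hxne),
         isMinP_equiv (mem_yset v h) (isMinP_min?_getD _ hyne),
         isMaxP_equiv (mem_yset v h) (isMaxP_max?_getD _ hyne)⟩

-- ===== VERDICT (by name: the statement is the Claim_ definition above) =====
theorem boundry_spec : Claim_equal_boundry := by
  intro v h _ hpre
  unfold Spec_boundry
  obtain ⟨hA1, hA2, hA3, hA4⟩ := A_bounds v h hpre
  obtain ⟨hB1, hB2, hB3, hB4⟩ := B_bounds v h hpre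
  refine Prod.ext_iff.mpr ⟨isMinP_unique hA1 hB1, Prod.ext_iff.mpr ⟨isMaxP_unique hA2 hB2,
    Prod.ext_iff.mpr ⟨isMinP_unique hA3 hB3, isMaxP_unique hA4 hB4⟩⟩⟩
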